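-- pv_equiv track=rewrite | github.com/riyanhax/Control_Venta_Jugos | taller_fundamentos/parcial_1.py | tienedigitosimpares
-- ===== SOURCE A (Python) =====
-- def tienedigitosimpares(N):
--     r = 0
--     while N > 0:
--         quita = N % 10
--         N //= 10
--         if quita % 2 != 0:
--             r = r + 1
--     if r >= 1:
--         return 1
--     elif r == 0:
--         return 0
-- ===== SOURCE B (Python) =====
-- def tienedigitosimpares(N):
--     if N <= 0:
--         return 0
--     return 1 if any(c in "13579" for c in str(N)) else 0
-- ===== Notes on version B (the rewrite author's own statement) =====
-- stated objective: idiomatic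
-- what changed: Replaces the least-significant-first arithmetic digit-extraction loop with an odd-digit counter by a most-significant-first scan of the decimal string str(N) with any(), keeping an explicit guard for nonpositive input that mirrors A's empty loop.
import Mathlib
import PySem

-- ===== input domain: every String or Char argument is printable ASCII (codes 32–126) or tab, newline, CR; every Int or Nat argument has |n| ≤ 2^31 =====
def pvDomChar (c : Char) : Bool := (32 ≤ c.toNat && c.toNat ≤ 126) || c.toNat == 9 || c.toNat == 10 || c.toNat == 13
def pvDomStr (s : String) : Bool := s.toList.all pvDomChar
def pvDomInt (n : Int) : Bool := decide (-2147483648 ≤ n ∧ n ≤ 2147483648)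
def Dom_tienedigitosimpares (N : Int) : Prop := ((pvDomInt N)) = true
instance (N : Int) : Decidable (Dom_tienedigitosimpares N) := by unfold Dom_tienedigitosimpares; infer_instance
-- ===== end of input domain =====

-- B replaces A's least-significant-first arithmetic digit loop with an any() scan of str(N); same result, no speed claim.

-- ===== PORT A =====
-- the 'while N > 0' loop of A, carrying the counter r
def pvLoopA (N r : Int) : Int :=
  if h : N > 0 then
    let quita := PySem.Int.mod N 10
    pvLoopA (PySem.Int.floordiv N 10) (if PySem.Int.mod quita 2 ≠ 0 then r + 1 else r)
  else r
termination_by N.toNat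
decreasing_by
  have h10 : N.fdiv 10 = N / 10 := by rw [Int.fdiv_eq_ediv]; simp
  simp only [PySem.Int.floordiv, h10]
  omega

-- A's trailing 'if r >= 1: return 1 elif r == 0: return 0' (r is never negative, so the
-- implicit-None third branch of the Python is unreachable)
def tienedigitosimpares (N : Int) : Int :=
  let r := pvLoopA N 0
  if r ≥ 1 then 1 else 0

-- ===== PORT B =====
def tienedigitosimpares_alt (N : Int) : Int :=
  if N ≤ 0 then 0
  else if (PySem.Int.toChars N).any (fun c => ['1','3','5','7','9'].contains c) then 1 else 0

-- ===== PRECONDITION & SPEC =====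
def Spec_tienedigitosimpares (N : Int) (out : Int) : Prop := out = tienedigitosimpares_alt N
instance (N : Int) (out : Int) : Decidable (Spec_tienedigitosimpares N out) := by unfold Spec_tienedigitosimpares; infer_instance

-- ===== CLAIM (what is proved, stated in full; the proofs are below) =====
def Claim_equal_tienedigitosimpares : Prop := ∀ (N : Int), Dom_tienedigitosimpares N → Spec_tienedigitosimpares N (tienedigitosimpares N)

-- ===== LEMMAS AND PROOFS =====

-- 'n has an odd decimal digit', extracted least-significant first (proof-side reference predicate)
def pvHasOdd (n : Nat) : Bool :=
  if h : n = 0 then false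
  else (decide (n % 10 % 2 = 1)) || pvHasOdd (n / 10)
termination_by n
decreasing_by omega

def pvOddCh (c : Char) : Bool := ['1','3','5','7','9'].contains c

theorem pvOddCh_digitChar (d : Nat) (h : d < 10) :
    pvOddCh (Nat.digitChar d) = decide (d % 2 = 1) := by
  interval_cases d <;> decide

theorem pvToDigitsCore_any (fuel : Nat) : ∀ (n : Nat) (ds : List Char), n < fuel →
    (Nat.toDigitsCore 10 fuel n ds).any pvOddCh = (pvHasOdd n || ds.any pvOddCh) := by
  induction fuel with
  | zero => intro n ds h; omega
  | succ m ih =>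
    intro n ds h
    rw [Nat.toDigitsCore]
    by_cases h0 : n / 10 = 0
    · have hn : n < 10 := by omega
      simp only [h0, if_true, List.any_cons]
      rw [pvOddCh_digitChar _ (Nat.mod_lt _ (by omega))]
      rw [pvHasOdd]
      by_cases hz : n = 0
      · simp [hz]
      · rw [dif_neg hz, pvHasOdd, dif_pos h0]
        have : n % 10 = n := Nat.mod_eq_of_lt hn
        simp [this]
    · simp only [if_neg h0]
      rw [ih (n / 10) _ (by omega), List.any_cons]
      rw [pvOddCh_digitChar _ (Nat.mod_lt _ (by omega))]
      conv_rhs => rw [pvHasOdd]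
      rw [dif_neg (by omega)]
      cases pvHasOdd (n / 10) <;> cases ds.any pvOddCh <;> simp

theorem pvLoopA_ge_one : ∀ (k : Nat) (N r : Int), N.toNat ≤ k → 0 ≤ r →
    (pvLoopA N r ≥ 1 ↔ (r ≥ 1 ∨ pvHasOdd N.toNat = true)) := by
  intro k
  induction k with
  | zero =>
    intro N r h hr
    rw [pvLoopA]
    have : ¬ N > 0 := by omega
    rw [dif_neg this]
    have hz : N.toNat = 0 := by omega
    rw [hz, pvHasOdd]
    simp
  | succ m ih =>
    intro N r h hr
    rw [pvLoopA]
    by_cases hp : N > 0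
    · rw [dif_pos hp]
      show pvLoopA (PySem.Int.floordiv N 10)
            (if PySem.Int.mod (PySem.Int.mod N 10) 2 ≠ 0 then r + 1 else r) ≥ 1 ↔
          r ≥ 1 ∨ pvHasOdd N.toNat = true
      have hfd : PySem.Int.floordiv N 10 = (N.toNat / 10 : Nat) := by
        have h10 : N.fdiv 10 = N / 10 := by rw [Int.fdiv_eq_ediv]; simp
        simp only [PySem.Int.floordiv, h10]; omega
      have hmd : PySem.Int.mod N 10 = (N.toNat % 10 : Nat) := by
        have h10 : N.fmod 10 = N % 10 := by rw [Int.fmod_eq_emod]; simp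
        simp only [PySem.Int.mod, h10]; omega
      have hm2 : PySem.Int.mod (PySem.Int.mod N 10) 2 = ((N.toNat % 10) % 2 : Nat) := by
        rw [hmd]
        have h2 : ((N.toNat % 10 : Nat) : Int).fmod 2 = ((N.toNat % 10 : Nat) : Int) % 2 := by
          rw [Int.fmod_eq_emod]; simp
        simp only [PySem.Int.mod, h2]; omega
      by_cases hodd : N.toNat % 10 % 2 = 1
      · have hc : PySem.Int.mod (PySem.Int.mod N 10) 2 ≠ 0 := by rw [hm2]; omega
        rw [if_pos hc, hfd, ih _ _ (by omega) (by omega)]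
        conv_rhs => rw [pvHasOdd, dif_neg (show N.toNat ≠ 0 by omega)]
        simp only [Int.toNat_natCast, hodd]
        simp
        omega
      · have hc : ¬ PySem.Int.mod (PySem.Int.mod N 10) 2 ≠ 0 := by rw [hm2]; omega
        rw [if_neg hc, hfd, ih _ _ (by omega) hr]
        conv_rhs => rw [pvHasOdd, dif_neg (show N.toNat ≠ 0 by omega)]
        have hd : decide (N.toNat % 10 % 2 = 1) = false := decide_eq_false hodd
        simp only [Int.toNat_natCast, hd, Bool.false_or]
    · rw [dif_neg hp]
      have hz : N.toNat = 0 := by omega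
      rw [hz, pvHasOdd]
      simp

theorem pvToChars_any (N : Int) (h : 0 < N) :
    (PySem.Int.toChars N).any pvOddCh = pvHasOdd N.toNat := by
  rw [PySem.Int.toChars, if_neg (by omega), Nat.toDigits,
      pvToDigitsCore_any _ _ _ (Nat.lt_succ_self _)]
  simp

-- ===== VERDICT (by name: the statement is the Claim_ definition above) =====
theorem tienedigitosimpares_spec : Claim_equal_tienedigitosimpares := by
  intro N _
  unfold Spec_tienedigitosimpares tienedigitosimpares tienedigitosimpares_alt
  by_cases hp : N ≤ 0
  · have h1 : pvLoopA N 0 = 0 := by rw [pvLoopA, dif_neg (by omega)]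
    simp [h1, hp]
  · rw [if_neg hp]
    have h0 : (0 : Int) < N := by omega
    have hiff := pvLoopA_ge_one N.toNat N 0 le_rfl le_rfl
    have hany : (PySem.Int.toChars N).any (fun c => ['1','3','5','7','9'].contains c)
        = pvHasOdd N.toNat := pvToChars_any N h0
    by_cases hodd : pvHasOdd N.toNat = true
    · have : pvLoopA N 0 ≥ 1 := hiff.mpr (Or.inr hodd)
      simp only [if_pos this, hany, hodd, reduceIte]
    · have : ¬ pvLoopA N 0 ≥ 1 := by
        intro hc
        rcases hiff.mp hc with h | h
        · omega
        · exact hodd h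
      simp only [if_neg this, hany]
      rw [if_neg (by simpa using hodd)]
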